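-- pv_equiv track=rewrite | github.com/Desstter/tetris-redbull | tetris_phone_bot.py | _split_merged_active_and_ghost
-- ===== SOURCE A (Python) =====
-- from typing import Optional, Tuple, List, Dict
--
-- def _split_merged_active_and_ghost(cells: List[Tuple[int,int]]) -> Tuple[List[Tuple[int,int]], List[Tuple[int,int]]]:
--     """Si `cells` contiene la pieza activa junto con su ghost, separa ambos conjuntos."""
--     if not cells or len(cells) <= 4:
--         return cells, []
--     cells_sorted = sorted(cells)
--     groups = [[cells_sorted[0]]]
--     for r, c in cells_sorted[1:]:
--         if r - groups[-1][-1][0] > 1: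
--             groups.append([])
--         groups[-1].append((r, c))
--     if len(groups) == 1:
--         return cells, []
--     groups.sort(key=lambda g: min(r for r, _ in g))
--     active = groups[0]
--     ghost = [cell for g in groups[1:] for cell in g]
--     return active, ghost
-- ===== SOURCE B (Python) =====
-- from typing import Tuple, List
--
-- def _split_merged_active_and_ghost(cells: List[Tuple[int,int]]) -> Tuple[List[Tuple[int,int]], List[Tuple[int,int]]]:
--     if not cells or len(cells) <= 4:
--         return cells, []
--     rows = sorted({r for r, _ in cells})
--     cut = None
--     for prev, cur in zip(rows, rows[1:]):
--         if cur - prev > 1: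
--             cut = cur
--             break
--     if cut is None:
--         return cells, []
--     cells_sorted = sorted(cells)
--     active = [cell for cell in cells_sorted if cell[0] < cut]
--     ghost = [cell for cell in cells_sorted if cell[0] >= cut]
--     return active, ghost
-- ===== Notes on version B (the rewrite author's own statement) =====
-- stated objective: simpler
-- what changed: Instead of building a list of row-groups, re-sorting it by min row and flattening, B scans the sorted distinct rows for the first gap > 1 and partitions the sorted cells by that cut row.
import Mathlib
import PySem

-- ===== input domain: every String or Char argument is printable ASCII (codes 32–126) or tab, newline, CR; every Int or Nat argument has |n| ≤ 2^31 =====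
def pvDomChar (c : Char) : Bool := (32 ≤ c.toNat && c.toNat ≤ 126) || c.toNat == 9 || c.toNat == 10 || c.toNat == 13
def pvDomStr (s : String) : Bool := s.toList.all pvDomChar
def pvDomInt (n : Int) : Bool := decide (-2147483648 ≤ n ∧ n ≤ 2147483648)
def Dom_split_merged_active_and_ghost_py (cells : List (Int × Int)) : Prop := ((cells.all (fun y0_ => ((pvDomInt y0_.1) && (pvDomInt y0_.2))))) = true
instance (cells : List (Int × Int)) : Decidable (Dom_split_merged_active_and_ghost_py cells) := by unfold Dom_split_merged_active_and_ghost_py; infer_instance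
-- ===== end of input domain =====

-- B finds the single gap row over the sorted distinct rows and partitions the sorted cells by it,
-- instead of A's building/re-sorting/flattening a list of row-groups; objective: simpler (same O(n log n) cost).

-- ===== PORT A =====
-- groups[-1][-1][0]  (groups and its last group are never empty when read; defaults are unreachable)
def pvLastRow (gs : List (List (Int × Int))) : Int :=
  ((gs.getLast?.getD []).getLast?.getD (0, 0)).1

-- groups[-1].append((r, c))
def pvAppendLast (gs : List (List (Int × Int))) (rc : Int × Int) : List (List (Int × Int)) :=
  gs.dropLast ++ [gs.getLast?.getD [] ++ [rc]]

-- loop body: if r - groups[-1][-1][0] > 1: groups.append([]); groups[-1].append((r, c))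
def pvStep (gs : List (List (Int × Int))) (rc : Int × Int) : List (List (Int × Int)) :=
  let gs' := if rc.1 - pvLastRow gs > 1 then gs ++ [[]] else gs
  pvAppendLast gs' rc

def split_merged_active_and_ghost_py (cells : List (Int × Int)) : (List (Int × Int)) × (List (Int × Int)) :=
  if cells = [] ∨ cells.length ≤ 4 then (cells, []) else
  match PySem.List.sorted2 cells Prod.fst Prod.snd false with
  | [] => (cells, [])  -- unreachable: cells is nonempty here, so is its sorted copy
  | x :: rest =>
    let groups := rest.foldl pvStep [[x]]
    if groups.length = 1 then (cells, [])
    else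
      -- groups.sort(key=lambda g: min(r for r, _ in g))  (groups are nonempty; the default is unreachable)
      let groups2 := PySem.List.sorted groups (fun g => (PySem.List.min? (g.map Prod.fst) (fun r => r)).getD 0) false
      (groups2.headD [], groups2.tail.flatten)

-- ===== PORT B =====
-- for prev, cur in zip(rows, rows[1:]): if cur - prev > 1: cut = cur; break
def pvFindCut : List Int → Option Int
  | a :: b :: t => if b - a > 1 then some b else pvFindCut (b :: t)
  | _ => none

def split_merged_active_and_ghost_py_alt (cells : List (Int × Int)) : (List (Int × Int)) × (List (Int × Int)) :=
  if cells = [] ∨ cells.length ≤ 4 then (cells, []) else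
  let rows := PySem.List.sorted (PySem.Set.ofList (cells.map Prod.fst)) (fun r => r) false
  match pvFindCut rows with
  | none => (cells, [])
  | some cut =>
    let s := PySem.List.sorted2 cells Prod.fst Prod.snd false
    (s.filter (fun p => decide (p.1 < cut)), s.filter (fun p => decide (p.1 ≥ cut)))

-- ===== PRECONDITION & SPEC =====
def Spec_split_merged_active_and_ghost_py (cells : List (Int × Int)) (out : (List (Int × Int)) × (List (Int × Int))) : Prop := out = split_merged_active_and_ghost_py_alt cells
instance (cells : List (Int × Int)) (out : (List (Int × Int)) × (List (Int × Int))) : Decidable (Spec_split_merged_active_and_ghost_py cells out) := by unfold Spec_split_merged_active_and_ghost_py; infer_instance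

-- ===== CLAIM (what is proved, stated in full; the proofs are below) =====
def Claim_equal_split_merged_active_and_ghost_py : Prop := ∀ (cells : List (Int × Int)), Dom_split_merged_active_and_ghost_py cells → Spec_split_merged_active_and_ghost_py cells (split_merged_active_and_ghost_py cells)

-- ===== LEMMAS AND PROOFS =====

-- proof model of A's grouping loop
def pvMerge : List (Int × Int) → List (Int × Int) → List (List (Int × Int))
  | g, [] => [g]
  | g, rc :: t =>
    if rc.1 - (g.getLast?.getD (0, 0)).1 > 1 then g :: pvMerge [rc] t
    else pvMerge (g ++ [rc]) t
  termination_by _ t => t.length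

-- first gap scanning consecutive sorted cells
def pvCutCell : List (Int × Int) → Option Int
  | a :: b :: t => if b.1 - a.1 > 1 then some b.1 else pvCutCell (b :: t)
  | _ => none

-- consecutive-dedup of the row column of a row-sorted cell list
def pvDdr : List (Int × Int) → List Int
  | [] => []
  | [a] => [a.1]
  | a :: b :: t => if a.1 = b.1 then pvDdr (b :: t) else a.1 :: pvDdr (b :: t)

lemma foldl_step_eq_merge : ∀ (t : List (Int × Int)) (gs : List (List (Int × Int))) (g : List (Int × Int)),
    List.foldl pvStep (gs ++ [g]) t = gs ++ pvMerge g t := by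
  intro t
  induction t with
  | nil => intro gs g; simp [pvMerge]
  | cons rc t ih =>
    intro gs g
    have hstep : pvStep (gs ++ [g]) rc =
        if rc.1 - (g.getLast?.getD (0, 0)).1 > 1 then (gs ++ [g]) ++ [[rc]] else gs ++ [g ++ [rc]] := by
      by_cases hgap : rc.1 - (g.getLast?.getD (0, 0)).1 > 1 <;>
        simp [pvStep, pvAppendLast, pvLastRow, hgap]
    by_cases hgap : rc.1 - (g.getLast?.getD (0, 0)).1 > 1
    · rw [List.foldl_cons, hstep, if_pos hgap, ih (gs ++ [g]) [rc]]
      rw [pvMerge, if_pos hgap]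
      simp
    · rw [List.foldl_cons, hstep, if_neg hgap, ih gs (g ++ [rc])]
      rw [pvMerge, if_neg hgap]

lemma merge_flatten : ∀ (t g : List (Int × Int)), (pvMerge g t).flatten = g ++ t := by
  intro t
  induction t with
  | nil => intro g; simp [pvMerge]
  | cons rc t ih =>
    intro g
    rw [pvMerge]
    by_cases hgap : rc.1 - (g.getLast?.getD (0, 0)).1 > 1
    · rw [if_pos hgap]; simp [ih]
    · rw [if_neg hgap]; simp [ih]

lemma merge_none : ∀ (t g : List (Int × Int)),
    pvCutCell ((g.getLast?.getD (0, 0)) :: t) = none → pvMerge g t = [g ++ t] := by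
  intro t
  induction t with
  | nil => intro g _; simp [pvMerge]
  | cons rc t ih =>
    intro g h
    rw [pvCutCell] at h
    by_cases hgap : rc.1 - (g.getLast?.getD (0, 0)).1 > 1
    · rw [if_pos hgap] at h; exact absurd h (by simp)
    · rw [if_neg hgap] at h
      rw [pvMerge, if_neg hgap, ih (g ++ [rc]) (by simpa using h)]
      simp

def pvKmin (g : List (Int × Int)) : Int := (PySem.List.min? (g.map Prod.fst) (fun r => r)).getD 0

lemma merge_length_pos : ∀ (t g : List (Int × Int)), 1 ≤ (pvMerge g t).length := by
  intro t
  induction t with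
  | nil => intro g; simp [pvMerge]
  | cons rc t ih =>
    intro g
    rw [pvMerge]
    by_cases hgap : rc.1 - (g.getLast?.getD (0, 0)).1 > 1
    · rw [if_pos hgap]; simp
    · rw [if_neg hgap]; exact ih _

lemma merge_groups_ne_nil : ∀ (t g : List (Int × Int)), g ≠ [] →
    ∀ gr ∈ pvMerge g t, gr ≠ [] := by
  intro t
  induction t with
  | nil => intro g hg gr hgr; simp [pvMerge] at hgr; rw [hgr]; exact hg
  | cons rc t ih =>
    intro g hg gr hgr
    rw [pvMerge] at hgr
    by_cases hgap : rc.1 - (g.getLast?.getD (0, 0)).1 > 1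
    · rw [if_pos hgap] at hgr
      rcases List.mem_cons.mp hgr with h | h
      · rw [h]; exact hg
      · exact ih [rc] (by simp) gr h
    · rw [if_neg hgap] at hgr
      exact ih (g ++ [rc]) (by simp) gr hgr

-- the minimum key of a nonempty group lies among its rows
lemma kmin_mem (g : List (Int × Int)) (hg : g ≠ []) : pvKmin g ∈ g.map Prod.fst := by
  unfold pvKmin
  cases hm : PySem.List.min? (g.map Prod.fst) (fun r => r) with
  | none =>
    have := PySem.List.min?_eq_none_iff (xs := g.map Prod.fst) (key := fun r => r)
    rw [hm] at this
    exact absurd (this.mp rfl) (by simpa using hg)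
  | some m => simpa using PySem.List.min?_mem hm

lemma merge_some : ∀ (t g : List (Int × Int)) (c : Int), g ≠ [] →
    (∀ p ∈ g, p.1 ≤ (g.getLast?.getD (0, 0)).1) →
    ((g ++ t).Pairwise (fun a b => a.1 ≤ b.1)) →
    pvCutCell ((g.getLast?.getD (0, 0)) :: t) = some c →
    2 ≤ (pvMerge g t).length ∧
    (pvMerge g t).headD [] = (g ++ t).filter (fun p => decide (p.1 < c)) ∧
    ((pvMerge g t).tail).flatten = (g ++ t).filter (fun p => decide (c ≤ p.1)) ∧
    ((pvMerge g t).map pvKmin).Pairwise (· < ·) := by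
  intro t
  induction t with
  | nil =>
    intro g c hg hA hpw hc
    simp [pvCutCell] at hc
  | cons rc t ih =>
    intro g c hg hA hpw hc
    obtain ⟨lg, hlg⟩ : ∃ lg, g.getLast? = some lg := by
      cases g with
      | nil => exact absurd rfl hg
      | cons y ys => exact ⟨_, List.getLast?_eq_some_getLast (by simp)⟩
    have hlgmem : lg ∈ g := List.mem_of_getLast? hlg
    rw [pvCutCell] at hc
    obtain ⟨hpw_g, hpw_rest, hcross⟩ := List.pairwise_append.mp hpw
    by_cases hgap : rc.1 - (g.getLast?.getD (0, 0)).1 > 1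
    · rw [if_pos hgap] at hc
      have hcrc : c = rc.1 := (Option.some.inj hc).symm
      have hlg' : (g.getLast?.getD (0, 0)).1 = lg.1 := by rw [hlg]; rfl
      rw [hlg'] at hgap
      have hglt : ∀ p ∈ g, p.1 < c := by
        intro p hp
        have h1 := hA p hp
        rw [hlg'] at h1
        omega
      have hrge : ∀ q ∈ rc :: t, c ≤ q.1 := by
        intro q hq
        rcases List.mem_cons.mp hq with h | h
        · rw [h]; omega
        · have := List.rel_of_pairwise_cons hpw_rest h; omega
      rw [pvMerge, if_pos (by omega)]
      refine ⟨by simpa using merge_length_pos t [rc], ?_, ?_, ?_⟩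
      · rw [List.headD_cons, List.filter_append]
        rw [List.filter_eq_self.mpr (fun p hp => by simpa using hglt p hp),
          List.filter_eq_nil_iff.mpr (fun q hq => by simp; have := hrge q hq; omega)]
        simp
      · rw [List.tail_cons, merge_flatten, List.filter_append]
        rw [List.filter_eq_nil_iff.mpr (fun p hp => by simp; have := hglt p hp; omega),
          List.filter_eq_self.mpr (fun q hq => by simpa using hrge q hq)]
        simp
      · rw [List.map_cons]
        refine List.Pairwise.cons ?_ ?_
        · intro k hk
          obtain ⟨gr, hgr, hgrk⟩ := List.mem_map.mp hk
          have hgrne : gr ≠ [] := merge_groups_ne_nil t [rc] (by simp) gr hgr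
          have hsub : ∀ p ∈ gr, p ∈ rc :: t := by
            intro p hp
            have : p ∈ (pvMerge [rc] t).flatten := List.mem_flatten.mpr ⟨gr, hgr, hp⟩
            rw [merge_flatten] at this
            simpa using this
          have hkm : k ∈ gr.map Prod.fst := hgrk ▸ kmin_mem gr hgrne
          obtain ⟨q, hq, hqk⟩ := List.mem_map.mp hkm
          have hck : c ≤ k := hqk ▸ hrge q (hsub q hq)
          have hgm : pvKmin g ∈ g.map Prod.fst := kmin_mem g hg
          obtain ⟨p, hp, hpk⟩ := List.mem_map.mp hgm
          have : pvKmin g < c := hpk ▸ hglt p hp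
          omega
        · cases hc2 : pvCutCell (([rc].getLast?.getD (0, 0)) :: t) with
          | none => rw [merge_none t [rc] hc2]; simp
          | some c2 =>
            exact (ih [rc] c2 (by simp) (by simp) (by simpa using hpw_rest) hc2).2.2.2
    · rw [if_neg hgap] at hc
      rw [pvMerge, if_neg hgap]
      have hlg' : (g.getLast?.getD (0, 0)).1 = lg.1 := by rw [hlg]; rfl
      have hlgrc : lg.1 ≤ rc.1 := hcross lg hlgmem rc (by simp)
      have h1 : (g ++ [rc]) ≠ [] := by simp
      have h2 : ∀ p ∈ g ++ [rc], p.1 ≤ (((g ++ [rc]).getLast?.getD (0, 0))).1 := by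
        intro p hp
        rw [List.getLast?_concat]
        rcases List.mem_append.mp hp with h | h
        · have := hA p h; rw [hlg'] at this; simp; omega
        · simp at h; simp [h]
      have h3 : ((g ++ [rc]) ++ t).Pairwise (fun a b => a.1 ≤ b.1) := by
        rw [List.append_assoc]; simpa using hpw
      have h4 : pvCutCell (((g ++ [rc]).getLast?.getD (0, 0)) :: t) = some c := by
        rw [List.getLast?_concat]; simpa using hc
      have := ih (g ++ [rc]) c h1 h2 h3 h4
      simpa using this

lemma ddr_head : ∀ (t : List (Int × Int)) (b : Int × Int), (pvDdr (b :: t)).head? = some b.1 := by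
  intro t
  induction t with
  | nil => intro b; simp [pvDdr]
  | cons c t ih =>
    intro b
    rw [pvDdr]
    by_cases h : b.1 = c.1
    · rw [if_pos h, ih c, h]
    · rw [if_neg h]; simp

lemma ddr_subset : ∀ (s : List (Int × Int)) (x : Int), x ∈ pvDdr s → x ∈ s.map Prod.fst := by
  intro s
  induction s with
  | nil => intro x h; simp [pvDdr] at h
  | cons a s ih =>
    intro x h
    cases s with
    | nil => simp [pvDdr] at h; simp [h]
    | cons b t =>
      rw [pvDdr] at h
      by_cases hab : a.1 = b.1
      · rw [if_pos hab] at h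
        have := ih x h; simp at this ⊢; tauto
      · rw [if_neg hab] at h
        simp at h
        rcases h with h | h
        · simp [h]
        · have := ih x (by simpa using h); simp at this ⊢; tauto

lemma ddr_mem : ∀ (s : List (Int × Int)), s.Pairwise (fun a b => a.1 ≤ b.1) →
    ∀ x, x ∈ pvDdr s ↔ x ∈ s.map Prod.fst := by
  intro s
  induction s with
  | nil => intro _ x; simp [pvDdr]
  | cons a s ih =>
    intro hpw x
    constructor
    · exact ddr_subset _ x
    · intro hx
      cases s with
      | nil => simp at hx; simp [pvDdr, hx]
      | cons b t =>
        rw [pvDdr]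
        have ih' := ih hpw.of_cons x
        by_cases hab : a.1 = b.1
        · rw [if_pos hab]
          rcases (by simpa using hx : x = a.1 ∨ x = b.1 ∨ x ∈ t.map Prod.fst) with h | h
          · exact ih'.mpr (by simp [hab ▸ h])
          · exact ih'.mpr (by simpa using h)
        · rw [if_neg hab]
          rcases (by simpa using hx : x = a.1 ∨ x = b.1 ∨ x ∈ t.map Prod.fst) with h | h
          · simp [h]
          · simp only [List.mem_cons]
            exact Or.inr (ih'.mpr (by simpa using h))

lemma ddr_pairwise : ∀ (s : List (Int × Int)), s.Pairwise (fun a b => a.1 ≤ b.1) →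
    (pvDdr s).Pairwise (· < ·) := by
  intro s
  induction s with
  | nil => intro _; simp [pvDdr]
  | cons a s ih =>
    intro hpw
    cases s with
    | nil => simp [pvDdr]
    | cons b t =>
      rw [pvDdr]
      have hrest := ih hpw.of_cons
      by_cases hab : a.1 = b.1
      · rw [if_pos hab]; exact hrest
      · rw [if_neg hab]
        refine List.Pairwise.cons ?_ hrest
        intro x hx
        have hxm := ddr_subset _ x hx
        have hab' : a.1 < b.1 := lt_of_le_of_ne (List.rel_of_pairwise_cons hpw (by simp)) hab
        rcases (by simpa using hxm : x = b.1 ∨ x ∈ t.map Prod.fst) with h | h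
        · omega
        · obtain ⟨q, hq, hqx⟩ := List.mem_map.mp h
          have : b.1 ≤ q.1 := List.rel_of_pairwise_cons hpw.of_cons hq
          omega

lemma findCut_ddr : ∀ (s : List (Int × Int)), s.Pairwise (fun a b => a.1 ≤ b.1) →
    pvFindCut (pvDdr s) = pvCutCell s := by
  intro s
  induction s with
  | nil => intro _; simp [pvDdr, pvFindCut, pvCutCell]
  | cons a s ih =>
    intro hpw
    cases s with
    | nil => simp [pvDdr, pvFindCut, pvCutCell]
    | cons b t =>
      have ih' := ih hpw.of_cons
      obtain ⟨rest', hd⟩ : ∃ rest', pvDdr (b :: t) = b.1 :: rest' := by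
        have := ddr_head t b
        cases hdd : pvDdr (b :: t) with
        | nil => rw [hdd] at this; simp at this
        | cons y ys => rw [hdd] at this; simp at this; exact ⟨ys, by rw [this]⟩
      rw [pvDdr, pvCutCell]
      by_cases hab : a.1 = b.1
      · rw [if_pos hab, if_neg (by omega), ih']
      · rw [if_neg hab, hd, pvFindCut]
        by_cases hgap : b.1 - a.1 > 1
        · rw [if_pos hgap, if_pos hgap]
        · rw [if_neg hgap, if_neg hgap, ← hd, ih']

lemma sorted2_eq_sorted_lex (xs : List (Int × Int)) :
    PySem.List.sorted2 xs Prod.fst Prod.snd false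
      = PySem.List.sorted xs (fun p => toLex p) false := by
  have h : (fun a b : Int × Int => decide (a.1 < b.1) || (!decide (b.1 < a.1) && decide (a.2 < b.2)))
      = fun a b : Int × Int => decide (toLex a < toLex b) := by
    funext a b
    rw [Bool.eq_iff_iff]
    simp only [Bool.or_eq_true, Bool.and_eq_true, Bool.not_eq_eq_eq_not, Bool.not_true,
      decide_eq_true_iff, decide_eq_false_iff_not, Prod.Lex.lt_iff, ofLex_toLex]
    omega
  unfold PySem.List.sorted2 PySem.List.sorted
  simp only [h, Bool.false_eq_true, if_false]

lemma sorted2_pairwise_row (xs : List (Int × Int)) :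
    (PySem.List.sorted2 xs Prod.fst Prod.snd false).Pairwise (fun a b => a.1 ≤ b.1) := by
  rw [sorted2_eq_sorted_lex]
  refine (PySem.List.sorted_pairwise xs (fun p => toLex p)).imp ?_
  intro a b hab
  rcases Prod.Lex.le_iff.mp hab with h | h
  · exact le_of_lt h
  · exact le_of_eq h.1

-- ===== VERDICT (by name: the statement is the Claim_ definition above) =====
theorem split_merged_active_and_ghost_py_spec : Claim_equal_split_merged_active_and_ghost_py := by
  intro cells _
  unfold Spec_split_merged_active_and_ghost_py
  by_cases hsmall : cells = [] ∨ cells.length ≤ 4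
  · rw [split_merged_active_and_ghost_py, split_merged_active_and_ghost_py_alt, if_pos hsmall,
      if_pos hsmall]
  · have hpw := sorted2_pairwise_row cells
    have hperm := PySem.List.sorted2_perm cells Prod.fst Prod.snd false
    have hcne : cells ≠ [] := fun hcnil => hsmall (Or.inl hcnil)
    have hcut : pvFindCut (PySem.List.sorted (PySem.Set.ofList (cells.map Prod.fst)) (fun r => r) false)
        = pvCutCell (PySem.List.sorted2 cells Prod.fst Prod.snd false) := by
      have hrows : PySem.List.sorted (PySem.Set.ofList (cells.map Prod.fst)) (fun r => r) false
          = pvDdr (PySem.List.sorted2 cells Prod.fst Prod.snd false) := by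
        have pw1 := PySem.List.sorted_ofList_pairwise_lt (cells.map Prod.fst)
        have pw2 := ddr_pairwise _ hpw
        have nd1 : (PySem.List.sorted (PySem.Set.ofList (cells.map Prod.fst)) (fun r => r) false).Nodup :=
          pw1.imp (fun h => ne_of_lt h)
        have nd2 : (pvDdr (PySem.List.sorted2 cells Prod.fst Prod.snd false)).Nodup :=
          pw2.imp (fun h => ne_of_lt h)
        have hmem : ∀ a, a ∈ PySem.List.sorted (PySem.Set.ofList (cells.map Prod.fst)) (fun r => r) false
            ↔ a ∈ pvDdr (PySem.List.sorted2 cells Prod.fst Prod.snd false) := by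
          intro a
          rw [PySem.List.mem_sorted, PySem.Set.mem_ofList, ddr_mem _ hpw a]
          exact ((hperm.map Prod.fst).mem_iff).symm
        exact List.Perm.eq_of_pairwise (fun a b _ _ h1 h2 => absurd h2 (lt_asymm h1)) pw1 pw2
          ((List.perm_ext_iff_of_nodup nd1 nd2).mpr hmem)
      rw [hrows]; exact findCut_ddr _ hpw
    rcases he : PySem.List.sorted2 cells Prod.fst Prod.snd false with _ | ⟨x, rest⟩
    · rw [he] at hperm
      have := hperm.length_eq
      cases cells with
      | nil => exact absurd rfl hcne
      | cons y ys => simp at this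
    · rw [he] at hcut hpw
      have hgroups : rest.foldl pvStep [[x]] = pvMerge [x] rest := by
        simpa using foldl_step_eq_merge rest [] [x]
      have hlastx : (([x] : List (Int × Int)).getLast?.getD ((0 : Int), (0 : Int))) = x := by simp
      cases hc : pvCutCell (x :: rest) with
      | none =>
        have hm : pvMerge [x] rest = [[x] ++ rest] :=
          merge_none rest [x] (by rw [hlastx]; exact hc)
        have hA : split_merged_active_and_ghost_py cells = (cells, []) := by
          rw [split_merged_active_and_ghost_py, if_neg hsmall, he]
          simp [hgroups, hm]
        have hB : split_merged_active_and_ghost_py_alt cells = (cells, []) := by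
          rw [split_merged_active_and_ghost_py_alt, if_neg hsmall]
          simp only [hcut, hc]
        rw [hA, hB]
      | some c =>
        obtain ⟨hlen, hhead, htail, hmins⟩ :=
          merge_some rest [x] c (by simp)
            (by intro p hp; simp at hp; simp [hp])
            (by simpa using hpw)
            (by rw [hlastx]; exact hc)
        have hsorted : PySem.List.sorted (pvMerge [x] rest)
            (fun g => (PySem.List.min? (g.map Prod.fst) (fun r => r)).getD 0) false
            = pvMerge [x] rest := by
          apply PySem.List.sorted_eq_of_perm_of_pairwise_lt _ _ _ (List.Perm.refl _)
          have := List.pairwise_map.mp hmins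
          simpa [pvKmin] using this
        have hA : split_merged_active_and_ghost_py cells
            = ((x :: rest).filter (fun p => decide (p.1 < c)),
               (x :: rest).filter (fun p => decide (c ≤ p.1))) := by
          rw [split_merged_active_and_ghost_py, if_neg hsmall, he]
          simp only [hgroups]
          rw [if_neg (by omega : ¬ (pvMerge [x] rest).length = 1)]
          simp only [hsorted]
          rw [hhead, htail]
          simp
        have hB : split_merged_active_and_ghost_py_alt cells
            = ((x :: rest).filter (fun p => decide (p.1 < c)),
               (x :: rest).filter (fun p => decide (p.1 ≥ c))) := by
          rw [split_merged_active_and_ghost_py_alt, if_neg hsmall]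
          simp only [hcut, hc, he]
        rw [hA, hB]
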